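-- pv_equiv track=rewrite | github.com/dee021/CodingTest | 프로그래머스/unrated/136798. 기사단원의 무기/기사단원의 무기.py | solution
-- ===== SOURCE A (Python) =====
-- def solution(number, limit, power):
--     arr = [1 for _ in range(number+1)]
--     answer = 0
--     for i in range(2, number+1):
--         for j in range(i, len(arr), i):
--             arr[j] += 1
--     for i in range(1, len(arr)):
--         answer += arr[i] if arr[i] <= limit else power
--     return answer
-- ===== SOURCE B (Python) =====
-- def solution(number, limit, power):
--     # Divisor-pair sieve: enumerate only k <= sqrt(i); each pair (k, i//k) adds 2,
--     # a square root adds 1 — instead of A's one-increment-per-divisor sieve.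
--     d = [0] * (number + 1)
--     k = 1
--     while k * k <= number:
--         d[k * k] += 1
--         for m in range(k * (k + 1), number + 1, k):
--             d[m] += 2
--         k += 1
--     answer = 0
--     for i in range(1, number + 1):
--         answer += d[i] if d[i] <= limit else power
--     return answer
-- ===== Notes on version B (the rewrite author's own statement) =====
-- stated objective: faster
-- what changed: Replaces A's per-divisor sieve (every i from 2 to n bumps all its multiples by 1) by a divisor-pair sieve: only k with k*k <= n are enumerated, each adding 2 at the multiples k*q with q > k and 1 at the square k*k; the threshold pass is unchanged.
import Mathlib
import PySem

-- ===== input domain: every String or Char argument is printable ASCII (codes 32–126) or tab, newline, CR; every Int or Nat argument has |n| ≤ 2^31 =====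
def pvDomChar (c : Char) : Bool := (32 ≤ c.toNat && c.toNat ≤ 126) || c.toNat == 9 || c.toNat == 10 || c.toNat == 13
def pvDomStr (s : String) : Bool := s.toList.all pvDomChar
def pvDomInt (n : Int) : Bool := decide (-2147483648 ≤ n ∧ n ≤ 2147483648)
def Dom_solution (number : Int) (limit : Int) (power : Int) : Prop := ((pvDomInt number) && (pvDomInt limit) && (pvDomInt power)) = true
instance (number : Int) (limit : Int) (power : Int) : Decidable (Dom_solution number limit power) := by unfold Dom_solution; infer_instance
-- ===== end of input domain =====

-- B replaces A's per-divisor sieve by a divisor-pair sieve (only k with k*k <= n enumerated, +2 per pair, +1 per square): same O(n log n) class, measurably faster by a constant factor (about half the array increments).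

-- ===== PORT A =====
-- A's `arr` is a Python list used as a mutable array; it is ported as Lean's Array for O(1)
-- element update.  pyAGet arr i = arr[i] and pySieveStep arr j = `arr[j] += 1`: both are exact
-- for 0 ≤ i/j < len(arr), which holds at every access A performs (range indices below len(arr)).
def pyAGet (arr : Array Int) (i : Int) : Int :=
  if 0 ≤ i then arr.getD i.toNat 0 else 0

def pySieveStep (arr : Array Int) (j : Int) : Array Int :=
  if 0 ≤ j then arr.setIfInBounds j.toNat (pyAGet arr j + 1) else arr

-- inner loop: for j in range(i, len(arr), i): arr[j] += 1
def sieveInner (arr : Array Int) (i : Int) : Array Int :=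
  (PySem.List.pyRange i (arr.size : Int) i).foldl pySieveStep arr

def solution (number : Int) (limit : Int) (power : Int) : Int :=
  let arr0 := ((PySem.List.pyRange 0 (number + 1) 1).map (fun _ => (1 : Int))).toArray
  let arr := (PySem.List.pyRange 2 (number + 1) 1).foldl sieveInner arr0
  (PySem.List.pyRange 1 (arr.size : Int) 1).foldl
    (fun answer i =>
      answer + (if pyAGet arr i ≤ limit then pyAGet arr i else power)) 0

-- ===== PORT B =====
-- B's `d` is a Python list used as a mutable array, ported as Lean's Array (like A's `arr`).
-- pyBGet d i = d[i] and pyBAdd d m inc = `d[m] += inc`: exact for 0 ≤ i/m < len(d), which holds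
-- at every access B performs.
def pyBGet (d : Array Int) (i : Int) : Int :=
  if 0 ≤ i then d.getD i.toNat 0 else 0

def pyBAdd (d : Array Int) (m : Int) (inc : Int) : Array Int :=
  if 0 ≤ m then d.setIfInBounds m.toNat (pyBGet d m + inc) else d

-- while k * k <= number: d[k*k] += 1; for m in range(k*(k+1), number+1, k): d[m] += 2; k += 1
def pairLoop (number : Int) (k : Int) (d : Array Int) : Array Int :=
  if _h : k * k ≤ number then
    pairLoop number (k + 1)
      ((PySem.List.pyRange (k * (k + 1)) (number + 1) k).foldl (fun d m => pyBAdd d m 2)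
        (pyBAdd d (k * k) 1))
  else d
termination_by (number + 1 - k).toNat
decreasing_by
  have hA : 2 * k - 1 ≤ number := by nlinarith [sq_nonneg (k - 1)]
  have hB : 0 ≤ number := le_trans (mul_self_nonneg k) _h
  omega

def solution_alt (number : Int) (limit : Int) (power : Int) : Int :=
  let d := pairLoop number 1 ((PySem.List.pyRepeat [(0 : Int)] (number + 1)).toArray)
  (PySem.List.pyRange 1 (number + 1) 1).foldl
    (fun answer i => answer + (if pyBGet d i ≤ limit then pyBGet d i else power)) 0

-- ===== PRECONDITION & SPEC =====
def Spec_solution (number : Int) (limit : Int) (power : Int) (out : Int) : Prop := out = solution_alt number limit power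
instance (number : Int) (limit : Int) (power : Int) (out : Int) : Decidable (Spec_solution number limit power out) := by unfold Spec_solution; infer_instance

-- ===== CLAIM (what is proved, stated in full; the proofs are below) =====
def Claim_equal_solution : Prop := ∀ (number : Int) (limit : Int) (power : Int), Dom_solution number limit power → Spec_solution number limit power (solution number limit power)

-- ===== LEMMAS AND PROOFS =====

-- the sieve loops preserve the array size
lemma size_foldl_pySieveStep (l : List Int) : ∀ arr : Array Int, (l.foldl pySieveStep arr).size = arr.size := by
  induction l with
  | nil => intro arr; rfl
  | cons m t ih =>
      intro arr
      rw [List.foldl_cons, ih]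
      unfold pySieveStep
      split <;> simp [Array.size_setIfInBounds]

lemma size_sieveInner (arr : Array Int) (i : Int) : (sieveInner arr i).size = arr.size := by
  simpa [sieveInner] using size_foldl_pySieveStep _ arr

lemma size_foldl_sieveInner (l : List Int) : ∀ arr : Array Int, (l.foldl sieveInner arr).size = arr.size := by
  induction l with
  | nil => intro arr; rfl
  | cons m t ih => intro arr; simp only [List.foldl_cons, ih, size_sieveInner]

-- folding `arr[j] += 1` over a list of valid indices adds the multiplicity of each index
lemma getD_foldl_pySieveStep (l : List Int) : ∀ (arr : Array Int),
    (∀ m ∈ l, 0 ≤ m ∧ m < (arr.size : Int)) → ∀ jn : Nat, jn < arr.size →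
    (l.foldl pySieveStep arr).getD jn 0 = arr.getD jn 0 + (l.count ((jn : Nat) : Int) : Int) := by
  induction l with
  | nil => intro arr _ jn _; simp
  | cons m t ih =>
      intro arr h jn hj
      obtain ⟨hm0, hmlt⟩ := h m (List.mem_cons_self ..)
      have hlen : (pySieveStep arr m).size = arr.size := by
        unfold pySieveStep
        split <;> simp [Array.size_setIfInBounds]
      have h' : ∀ x ∈ t, 0 ≤ x ∧ x < ((pySieveStep arr m).size : Int) := by
        intro x hx; rw [hlen]; exact h x (List.mem_cons_of_mem _ hx)
      rw [List.foldl_cons, ih _ h' jn (by omega)]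
      have hstep : (pySieveStep arr m).getD jn 0 =
          arr.getD jn 0 + (if m = (jn : Int) then (1:Int) else 0) := by
        rw [pySieveStep, if_pos hm0]
        by_cases he : m = (jn : Int)
        · subst he
          simp [Array.getD_eq_getD_getElem?, Array.getElem?_setIfInBounds, hj,
                Array.getElem?_eq_getElem (show ((jn:Int).toNat : Nat) < arr.size by omega), pyAGet, hm0]
        · have hne : m.toNat ≠ jn := by omega
          simp [Array.getD_eq_getD_getElem?, Array.getElem?_setIfInBounds, hne, he]
      rw [hstep, List.count_cons]
      by_cases he : m = (jn : Int) <;> simp [he] <;> ring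

lemma nodup_pyRange_pos (a b s : Int) (hs : 0 < s) : (PySem.List.pyRange a b s).Nodup := by
  rw [PySem.List.pyRange_of_pos a b hs]
  refine List.Nodup.map ?_ (List.nodup_range)
  intro x y hxy
  simp only at hxy
  have : s * (x:Int) = s * y := by omega
  have := mul_left_cancel₀ (by omega : s ≠ 0) this
  exact_mod_cast this

-- one inner pass at step i ≥ 1 adds 1 exactly at the multiples of i that are ≥ i
lemma getD_sieveInner (arr : Array Int) (i : Int) (hi : 1 ≤ i) (jn : Nat) (hj : jn < arr.size) :
    (sieveInner arr i).getD jn 0 =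
      arr.getD jn 0 + (if i ∣ (jn : Int) ∧ i ≤ (jn : Int) then (1 : Int) else 0) := by
  rw [sieveInner]
  rw [getD_foldl_pySieveStep _ arr ?_ jn hj]
  · congr 1
    have hmem : ((jn:Int) ∈ PySem.List.pyRange i (arr.size : Int) i) ↔ (i ∣ (jn : Int) ∧ i ≤ (jn : Int)) := by
      rw [PySem.List.mem_pyRange_iff_of_pos (by omega)]
      constructor
      · rintro ⟨h1, h2, h3⟩
        exact ⟨by have := dvd_add h3 (dvd_refl i); simpa using this, h1⟩
      · rintro ⟨h1, h2⟩
        exact ⟨h2, by exact_mod_cast hj, dvd_sub h1 (dvd_refl i)⟩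
    by_cases hc : i ∣ (jn : Int) ∧ i ≤ (jn : Int)
    · rw [if_pos hc]
      rw [List.count_eq_one_of_mem (nodup_pyRange_pos _ _ _ (by omega)) (hmem.mpr hc)]
      rfl
    · rw [if_neg hc, List.count_eq_zero_of_not_mem (fun hm => hc (hmem.mp hm))]
      rfl
  · intro m hm
    rw [PySem.List.mem_pyRange_iff_of_pos (by omega)] at hm
    exact ⟨by omega, hm.2.1⟩

lemma getD_foldl_sieveInner (l : List Int) : ∀ (arr : Array Int), (∀ i ∈ l, 1 ≤ i) → ∀ jn : Nat, jn < arr.size →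
    (l.foldl sieveInner arr).getD jn 0 =
      arr.getD jn 0 + ((l.countP (fun i => decide (i ∣ (jn : Int) ∧ i ≤ (jn : Int)))) : Int) := by
  induction l with
  | nil => intro arr _ jn _; simp
  | cons m t ih =>
      intro arr h jn hj
      have hm1 : 1 ≤ m := h m (List.mem_cons_self ..)
      rw [List.foldl_cons,
          ih _ (fun x hx => h x (List.mem_cons_of_mem _ hx)) jn (by rw [size_sieveInner]; exact hj),
          getD_sieveInner arr m hm1 jn hj, List.countP_cons]
      by_cases hc : m ∣ (jn : Int) ∧ m ≤ (jn : Int) <;> simp [hc] <;> ring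

-- a countP over a unit-step range is a filtered-interval cardinality
lemma countP_pyRange_one (a b : Int) (p : Int → Bool) :
    (PySem.List.pyRange a b 1).countP p = ((Finset.Ico a b).filter (fun x => p x = true)).card := by
  rw [List.countP_eq_length_filter,
      ← List.toFinset_card_of_nodup ((PySem.List.nodup_pyRange_one a b).filter p)]
  congr 1
  ext x
  simp [PySem.List.mem_pyRange_one, Finset.mem_filter, Finset.mem_Ico, and_comm]

lemma card_divisors_split (j : Nat) (hj : 1 ≤ j) :
    (Nat.divisors j).card = 1 + ((Finset.Ico 2 (j + 1)).filter (· ∣ j)).card := by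
  rw [← Finset.filter_card_add_filter_neg_card_eq_card (s := Nat.divisors j) (p := fun d => 2 ≤ d)]
  have h1 : (Nat.divisors j).filter (fun d => ¬ 2 ≤ d) = {1} := by
    ext d
    simp only [Finset.mem_filter, Nat.mem_divisors, Finset.mem_singleton]
    constructor
    · rintro ⟨⟨hd, hne⟩, hlt⟩
      have := Nat.pos_of_dvd_of_pos hd (by omega)
      omega
    · rintro rfl; exact ⟨⟨one_dvd j, by omega⟩, by omega⟩
  have h2 : (Nat.divisors j).filter (fun d => 2 ≤ d) = (Finset.Ico 2 (j + 1)).filter (· ∣ j) := by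
    ext d
    simp only [Finset.mem_filter, Nat.mem_divisors, Finset.mem_Ico]
    constructor
    · rintro ⟨⟨hd, hne⟩, hle⟩
      exact ⟨⟨hle, by have := Nat.le_of_dvd (by omega) hd; omega⟩, hd⟩
    · rintro ⟨⟨h2d, hdj⟩, hd⟩
      exact ⟨⟨hd, by omega⟩, h2d⟩
  rw [h1, h2]
  simp [add_comm]

-- the sieve array holds the divisor count at every index 1 ≤ j ≤ number
lemma sieve_getD (number : Int) (hn : 0 ≤ number) (jn : Nat) (h1 : 1 ≤ jn) (h2 : (jn : Int) ≤ number) :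
    ((PySem.List.pyRange 2 (number + 1) 1).foldl sieveInner
        ((PySem.List.pyRange 0 (number + 1) 1).map (fun _ => (1 : Int))).toArray).getD jn 0 =
      ((Nat.divisors jn).card : Int) := by
  set arr0 := ((PySem.List.pyRange 0 (number + 1) 1).map (fun _ => (1 : Int))).toArray with harr0
  have hlen : arr0.size = (number + 1).toNat := by
    simp [harr0, List.size_toArray, PySem.List.length_pyRange_one]
  have hjlt : jn < arr0.size := by omega
  have hone : arr0.getD jn 0 = 1 := by
    have hjl : jn < ((PySem.List.pyRange 0 (number + 1) 1).map (fun _ => (1 : Int))).length := by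
      simpa [harr0, List.size_toArray] using hjlt
    rw [harr0, Array.getD_eq_getD_getElem?, List.getElem?_toArray,
        List.getElem?_eq_getElem hjl]
    simp
  rw [getD_foldl_sieveInner _ arr0
      (fun i hi => by rw [PySem.List.mem_pyRange_one] at hi; omega) jn hjlt, hone]
  rw [countP_pyRange_one]
  -- restrict the interval to [2, jn+1) and move to Nat
  have hIco : (Finset.Ico (2:Int) (number + 1)).filter
        (fun x => decide (x ∣ (jn : Int) ∧ x ≤ (jn : Int)) = true) =
      (Finset.Ico (2:Int) ((jn : Int) + 1)).filter (fun x => x ∣ (jn : Int)) := by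
    ext x
    simp only [Finset.mem_filter, Finset.mem_Ico, decide_eq_true_eq]
    constructor
    · rintro ⟨⟨hx2, _⟩, hdvd, hle⟩; exact ⟨⟨hx2, by omega⟩, hdvd⟩
    · rintro ⟨⟨hx2, hxlt⟩, hdvd⟩; exact ⟨⟨hx2, by omega⟩, hdvd, by omega⟩
  rw [hIco]
  have hbij : ((Finset.Ico (2:Int) ((jn : Int) + 1)).filter (fun x => x ∣ (jn : Int))).card =
      ((Finset.Ico 2 (jn + 1)).filter (· ∣ jn)).card := by
    refine Finset.card_nbij' (i := fun x => x.toNat) (j := fun d => (d : Int)) ?_ ?_ ?_ ?_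
    · intro x hx
      simp only [Finset.coe_filter, Finset.mem_Ico, Set.mem_setOf_eq] at hx ⊢
      obtain ⟨⟨hx2, hxlt⟩, hdvd⟩ := hx
      refine ⟨⟨by omega, by omega⟩, ?_⟩
      have hx' : x = (x.toNat : Int) := by omega
      rw [hx'] at hdvd
      exact_mod_cast hdvd
    · intro d hd
      simp only [Finset.coe_filter, Finset.mem_Ico, Set.mem_setOf_eq] at hd ⊢
      obtain ⟨⟨hd2, hdlt⟩, hdvd⟩ := hd
      exact ⟨⟨by omega, by omega⟩, by exact_mod_cast hdvd⟩
    · intro x hx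
      simp only [Finset.coe_filter, Finset.mem_Ico, Set.mem_setOf_eq] at hx
      show ((x.toNat : Nat) : Int) = x
      omega
    · intro d _
      simp
  rw [hbij, card_divisors_split jn h1]
  push_cast
  ring

def sqrtSum (n k : Nat) : Int :=
  ∑ m ∈ Finset.Icc k (Nat.sqrt n), (if m ∣ n then (if m * m = n then (1 : Int) else 2) else 0)

-- pairing d ↔ n/d : the sqrt-bounded weighted count is the full divisor count
lemma sqrtSum_one (n : Nat) (hn : 1 ≤ n) : sqrtSum n 1 = ((Nat.divisors n).card : Int) := by
  have hSL : ((Nat.divisors n).filter (fun d => d ≤ Nat.sqrt n)).card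
      + ((Nat.divisors n).filter (fun d => ¬ d ≤ Nat.sqrt n)).card = (Nat.divisors n).card :=
    Finset.filter_card_add_filter_neg_card_eq_card _
  have hQP : (((Nat.divisors n).filter (fun d => d ≤ Nat.sqrt n)).filter (fun d => d * d = n)).card
      + (((Nat.divisors n).filter (fun d => d ≤ Nat.sqrt n)).filter (fun d => ¬ d * d = n)).card
      = ((Nat.divisors n).filter (fun d => d ≤ Nat.sqrt n)).card :=
    Finset.filter_card_add_filter_neg_card_eq_card _
  have hLP : ((Nat.divisors n).filter (fun d => ¬ d ≤ Nat.sqrt n)).card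
      = (((Nat.divisors n).filter (fun d => d ≤ Nat.sqrt n)).filter (fun d => ¬ d * d = n)).card := by
    refine Finset.card_nbij' (i := fun d => n / d) (j := fun e => n / e) ?_ ?_ ?_ ?_
    · intro d hd
      simp only [Finset.mem_coe, Finset.mem_filter, Nat.mem_divisors] at hd ⊢
      obtain ⟨⟨⟨e, he⟩, hne⟩, hgt⟩ := hd
      have hd0 : 0 < d := Nat.pos_of_dvd_of_pos ⟨e, he⟩ (by omega)
      have hdiv : n / d = e := by rw [he, Nat.mul_div_cancel_left _ hd0]
      have hnlt : n < d * d := Nat.sqrt_lt.mp (by omega)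
      have he0 : 0 < e := by
        rcases Nat.eq_zero_or_pos e with h0 | h0
        · subst h0; simp at he; omega
        · exact h0
      have hed : e < d := lt_of_mul_lt_mul_left (a := d) (by omega) (le_of_lt hd0)
      have hee : e * e < n := by
        calc e * e < d * e := (Nat.mul_lt_mul_right he0).mpr hed
        _ = n := he.symm
      rw [hdiv]
      exact ⟨⟨⟨⟨d, by rw [he, Nat.mul_comm]⟩, by omega⟩, Nat.le_sqrt.mpr (le_of_lt hee)⟩, by omega⟩
    · intro e he'
      simp only [Finset.mem_coe, Finset.mem_filter, Nat.mem_divisors] at he' ⊢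
      obtain ⟨⟨⟨⟨d, hd⟩, hne⟩, hle⟩, hnsq⟩ := he'
      have he0 : 0 < e := Nat.pos_of_dvd_of_pos ⟨d, hd⟩ (by omega)
      have hdiv : n / e = d := by rw [hd, Nat.mul_div_cancel_left _ he0]
      have hee : e * e ≤ n := Nat.le_sqrt.mp hle
      have hd0 : 0 < d := by
        rcases Nat.eq_zero_or_pos d with h0 | h0
        · subst h0; simp at hd; omega
        · exact h0
      have hed : e < d := lt_of_mul_lt_mul_left (a := e) (by omega) (le_of_lt he0)
      have hnd : n < d * d := by
        calc n = e * d := hd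
        _ < d * d := (Nat.mul_lt_mul_right hd0).mpr hed
      rw [hdiv]
      exact ⟨⟨⟨e, by rw [hd, Nat.mul_comm]⟩, by omega⟩, by have := Nat.sqrt_lt.mpr hnd; omega⟩
    · intro d hd
      simp only [Finset.mem_coe, Finset.mem_filter, Nat.mem_divisors] at hd
      exact Nat.div_div_self hd.1.1 (by omega)
    · intro e he'
      simp only [Finset.mem_coe, Finset.mem_filter, Nat.mem_divisors] at he'
      exact Nat.div_div_self he'.1.1.1 (by omega)
  have hsum : sqrtSum n 1 =
      ((((Nat.divisors n).filter (fun d => d ≤ Nat.sqrt n)).filter (fun d => d * d = n)).card : Int)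
      + 2 * ((((Nat.divisors n).filter (fun d => d ≤ Nat.sqrt n)).filter (fun d => ¬ d * d = n)).card : Int) := by
    have hSeq : (Nat.divisors n).filter (fun d => d ≤ Nat.sqrt n)
        = (Finset.Icc 1 (Nat.sqrt n)).filter (fun d => d ∣ n) := by
      ext d
      simp only [Finset.mem_filter, Nat.mem_divisors, Finset.mem_Icc]
      constructor
      · rintro ⟨⟨hd, hne⟩, hle⟩
        exact ⟨⟨Nat.pos_of_dvd_of_pos hd (by omega), hle⟩, hd⟩
      · rintro ⟨⟨h1, hle⟩, hd⟩
        exact ⟨⟨hd, by omega⟩, hle⟩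
    have h1 : sqrtSum n 1 = ∑ d ∈ (Nat.divisors n).filter (fun d => d ≤ Nat.sqrt n),
        (if d * d = n then (1 : Int) else 2) := by
      rw [sqrtSum, hSeq, Finset.sum_filter]
    rw [h1, ← Finset.sum_filter_add_sum_filter_not ((Nat.divisors n).filter (fun d => d ≤ Nat.sqrt n))
        (fun d => d * d = n)]
    have hQ1 : ∑ d ∈ ((Nat.divisors n).filter (fun d => d ≤ Nat.sqrt n)).filter (fun d => d * d = n),
        (if d * d = n then (1 : Int) else 2)
        = ((((Nat.divisors n).filter (fun d => d ≤ Nat.sqrt n)).filter (fun d => d * d = n)).card : Int) := by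
      rw [Finset.sum_congr rfl (fun x hx => if_pos ((Finset.mem_filter.mp hx).2))]
      simp
    have hP2 : ∑ d ∈ ((Nat.divisors n).filter (fun d => d ≤ Nat.sqrt n)).filter (fun d => ¬ d * d = n),
        (if d * d = n then (1 : Int) else 2)
        = 2 * ((((Nat.divisors n).filter (fun d => d ≤ Nat.sqrt n)).filter (fun d => ¬ d * d = n)).card : Int) := by
      rw [Finset.sum_congr rfl (fun x hx => if_neg ((Finset.mem_filter.mp hx).2))]
      simp [mul_comm]
    rw [hQ1, hP2]
  rw [hsum]
  have hcard : (Nat.divisors n).card =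
      (((Nat.divisors n).filter (fun d => d ≤ Nat.sqrt n)).filter (fun d => d * d = n)).card
      + 2 * (((Nat.divisors n).filter (fun d => d ≤ Nat.sqrt n)).filter (fun d => ¬ d * d = n)).card := by
    omega
  rw [hcard]
  push_cast
  ring

lemma size_pyBAdd (d : Array Int) (m inc : Int) : (pyBAdd d m inc).size = d.size := by
  unfold pyBAdd; split <;> simp [Array.size_setIfInBounds]

lemma size_foldl_pyBAdd (l : List Int) : ∀ d : Array Int,
    (l.foldl (fun d m => pyBAdd d m 2) d).size = d.size := by
  induction l with
  | nil => intro d; rfl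
  | cons m t ih => intro d; rw [List.foldl_cons, ih, size_pyBAdd]

lemma getD_pyBAdd (d : Array Int) (m inc : Int) (hm0 : 0 ≤ m) (hmlt : m < (d.size : Int))
    (jn : Nat) (hj : jn < d.size) :
    (pyBAdd d m inc).getD jn 0 = d.getD jn 0 + (if m = (jn : Int) then inc else 0) := by
  rw [pyBAdd, if_pos hm0]
  by_cases he : m = (jn : Int)
  · subst he
    simp [Array.getD_eq_getD_getElem?, Array.getElem?_setIfInBounds, hj,
          Array.getElem?_eq_getElem (show ((jn:Int).toNat : Nat) < d.size by omega), pyBGet, hm0]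
  · have hne : m.toNat ≠ jn := by omega
    simp [Array.getD_eq_getD_getElem?, Array.getElem?_setIfInBounds, hne, he]

lemma getD_foldl_pyBAdd (l : List Int) : ∀ (d : Array Int),
    (∀ m ∈ l, 0 ≤ m ∧ m < (d.size : Int)) → ∀ jn : Nat, jn < d.size →
    (l.foldl (fun d m => pyBAdd d m 2) d).getD jn 0
      = d.getD jn 0 + 2 * (l.count ((jn : Nat) : Int) : Int) := by
  induction l with
  | nil => intro d _ jn _; simp
  | cons m t ih =>
      intro d h jn hj
      obtain ⟨hm0, hmlt⟩ := h m (List.mem_cons_self ..)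
      have h' : ∀ x ∈ t, 0 ≤ x ∧ x < ((pyBAdd d m 2).size : Int) := by
        intro x hx; rw [size_pyBAdd]; exact h x (List.mem_cons_of_mem _ hx)
      rw [List.foldl_cons, ih _ h' jn (by rw [size_pyBAdd]; exact hj),
          getD_pyBAdd d m 2 hm0 hmlt jn hj, List.count_cons]
      by_cases he : m = (jn : Int) <;> simp [he] <;> ring

def pairSum (N j k : Nat) : Int :=
  ∑ m ∈ Finset.Icc k (Nat.sqrt N),
    ((if m * m = j then (1 : Int) else 0) + 2 * (if m ∣ j ∧ m * (m + 1) ≤ j then 1 else 0))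

lemma pairSum_step (N j k : Nat) (hk : k ≤ Nat.sqrt N) :
    pairSum N j k = ((if k * k = j then (1 : Int) else 0)
      + 2 * (if k ∣ j ∧ k * (k + 1) ≤ j then 1 else 0)) + pairSum N j (k + 1) := by
  have hins : Finset.Icc k (Nat.sqrt N) = insert k (Finset.Icc (k + 1) (Nat.sqrt N)) := by
    ext x; simp [Finset.mem_Icc, Finset.mem_insert]; omega
  rw [pairSum, hins, Finset.sum_insert (by simp [Finset.mem_Icc])]
  rfl

lemma pairLoop_getD (N : Nat) : ∀ t (k : Nat) (d : Array Int), 1 ≤ k → Nat.sqrt N + 1 - k ≤ t →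
    (d.size : Int) = (N : Int) + 1 → ∀ jn : Nat, jn < d.size →
    (pairLoop (N : Int) (k : Int) d).getD jn 0 = d.getD jn 0 + pairSum N jn k := by
  intro t
  induction t with
  | zero =>
      intro k d hk ht hsz jn hj
      have hgt : Nat.sqrt N < k := by omega
      have hnn : (N : Int) < (k : Int) * (k : Int) := by exact_mod_cast Nat.sqrt_lt.mp hgt
      rw [pairLoop, dif_neg (by omega)]
      have hemp : Finset.Icc k (Nat.sqrt N) = ∅ := Finset.Icc_eq_empty (by omega)
      simp [pairSum, hemp]
  | succ t ih =>
      intro k d hk ht hsz jn hj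
      by_cases hle : k ≤ Nat.sqrt N
      · have hkk : (k : Int) * (k : Int) ≤ (N : Int) := by
          exact_mod_cast Nat.le_sqrt.mp hle
        rw [pairLoop, dif_pos hkk]
        -- the array after this iteration's updates
        have hsz1 : ((pyBAdd d ((k:Int) * k) 1).size : Int) = (N : Int) + 1 := by
          rw [size_pyBAdd]; exact hsz
        have hvalid : ∀ m ∈ PySem.List.pyRange ((k:Int) * (k + 1)) ((N:Int) + 1) k,
            0 ≤ m ∧ m < ((pyBAdd d ((k:Int) * k) 1).size : Int) := by
          intro m hm
          rw [PySem.List.mem_pyRange_iff_of_pos (by exact_mod_cast hk)] at hm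
          rw [hsz1]
          constructor
          · have : (0:Int) ≤ (k:Int) * (k + 1) := by positivity
            omega
          · exact hm.2.1
        have hcast : ((k : Int) + 1) = (((k + 1 : Nat)) : Int) := by push_cast; ring
        rw [hcast, ih (k + 1) _ (by omega) (by omega)
              (by rw [size_foldl_pyBAdd, size_pyBAdd]; exact hsz)
              jn (by rw [size_foldl_pyBAdd, size_pyBAdd]; exact hj)]
        rw [getD_foldl_pyBAdd _ _ (by rw [← hcast]; exact hvalid) jn
              (by rw [size_pyBAdd]; exact hj)]
        rw [getD_pyBAdd d _ 1 (by positivity) (by omega) jn hj]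
        rw [pairSum_step N jn k hle]
        -- identify the two indicators
        have hsq : ((k : Int) * (k : Int) = ((jn : Nat) : Int)) ↔ (k * k = jn) := by
          constructor
          · intro h; exact_mod_cast h
          · intro h; exact_mod_cast h
        have hcnt : ((PySem.List.pyRange ((k:Int) * (((k + 1 : Nat)) : Int)) ((N:Int) + 1) k).count
              ((jn : Nat) : Int) : Int)
            = (if k ∣ jn ∧ k * (k + 1) ≤ jn then (1:Int) else 0) := by
          have hmem : (((jn : Nat) : Int) ∈
              PySem.List.pyRange ((k:Int) * (((k + 1 : Nat)) : Int)) ((N:Int) + 1) k)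
              ↔ (k ∣ jn ∧ k * (k + 1) ≤ jn) := by
            rw [PySem.List.mem_pyRange_iff_of_pos (by exact_mod_cast hk)]
            constructor
            · rintro ⟨h1, h2, h3⟩
              have hd : (k:Int) ∣ (jn : Int) := by
                have := dvd_add h3 (Dvd.intro (((k+1:Nat)):Int) rfl)
                simpa using this
              refine ⟨by exact_mod_cast hd, by exact_mod_cast h1⟩
            · rintro ⟨h1, h2⟩
              have hjlt : ((jn:Nat) : Int) < (N:Int) + 1 := by
                have : (jn : Int) < (d.size : Int) := by exact_mod_cast hj
                omega
              refine ⟨by exact_mod_cast h2, hjlt, ?_⟩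
              have hd : (k:Int) ∣ (jn : Int) := by exact_mod_cast h1
              exact dvd_sub hd (Dvd.intro (((k+1:Nat)):Int) rfl)
          by_cases hc : k ∣ jn ∧ k * (k + 1) ≤ jn
          · rw [if_pos hc, List.count_eq_one_of_mem
                (nodup_pyRange_pos _ _ _ (by exact_mod_cast hk)) (hmem.mpr hc)]
            rfl
          · rw [if_neg hc, List.count_eq_zero_of_not_mem (fun hm => hc (hmem.mp hm))]
            rfl
        rw [hcnt]
        by_cases h2 : k * k = jn
        · rw [if_pos (hsq.mpr h2), if_pos h2]; ring
        · rw [if_neg (fun hc => h2 (hsq.mp hc)), if_neg h2]; ring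
      · have hnn : (N : Int) < (k : Int) * (k : Int) := by
          exact_mod_cast Nat.sqrt_lt.mp (by omega)
        rw [pairLoop, dif_neg (by omega)]
        have hemp : Finset.Icc k (Nat.sqrt N) = ∅ := Finset.Icc_eq_empty (by omega)
        simp [pairSum, hemp]

lemma pairSum_eq_sqrtSum (N j : Nat) (hj1 : 1 ≤ j) (hjN : j ≤ N) :
    pairSum N j 1 = sqrtSum j 1 := by
  rw [pairSum, sqrtSum]
  rw [← Finset.sum_subset (Finset.Icc_subset_Icc le_rfl (Nat.sqrt_le_sqrt hjN)) ?vanish]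
  · apply Finset.sum_congr rfl
    intro m hm
    rw [Finset.mem_Icc] at hm
    have hmm : m * m ≤ j := Nat.le_sqrt.mp hm.2
    by_cases h1 : m ∣ j
    · by_cases h2 : m * m = j
      · have hexp : m * (m + 1) = m * m + m := by ring
        have : ¬ m * (m + 1) ≤ j := by omega
        rw [if_pos h2, if_neg (fun hc => this hc.2), if_pos h1, if_pos h2]
        ring
      · have hlt : m * m < j := by omega
        obtain ⟨q, hq⟩ := h1
        have hm0 : 0 < m := by omega
        have hqm : m < q := by
          by_contra hqm
          push_neg at hqm
          have : j ≤ m * m := by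
            calc j = m * q := hq
            _ ≤ m * m := Nat.mul_le_mul_left m hqm
          omega
        have hle : m * (m + 1) ≤ j := by
          calc m * (m + 1) ≤ m * q := Nat.mul_le_mul_left m (by omega)
          _ = j := hq.symm
        rw [if_neg h2, if_pos ⟨⟨q, hq⟩, hle⟩, if_pos ⟨q, hq⟩, if_neg h2]
        ring
    · have hns : ¬ m * m = j := fun hc => h1 ⟨m, hc.symm⟩
      rw [if_neg hns, if_neg (fun hc => h1 hc.1), if_neg h1]
      ring
  · intro m hmN hmj
    rw [Finset.mem_Icc] at hmN
    have hgt : Nat.sqrt j < m := by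
      rw [Finset.mem_Icc] at hmj; omega
    have hlt : j < m * m := Nat.sqrt_lt.mp hgt
    have h2 : ¬ m * m = j := by omega
    have h3 : ¬ m * (m + 1) ≤ j := by nlinarith
    rw [if_neg h2, if_neg (fun hc => h3 hc.2)]
    ring

-- ===== VERDICT (by name: the statement is the Claim_ definition above) =====
theorem solution_spec : Claim_equal_solution := by
  intro number limit power _
  show solution number limit power = solution_alt number limit power
  rcases lt_or_ge number 0 with hneg | hpos
  · have h0 : number + 1 ≤ (0:Int) := by omega
    have h1 : number + 1 ≤ (1:Int) := by omega
    have h2 : number + 1 ≤ (2:Int) := by omega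
    simp [solution, solution_alt, PySem.List.pyRange_one_eq_nil h0,
          PySem.List.pyRange_one_eq_nil h1, PySem.List.pyRange_one_eq_nil h2,
          PySem.List.pyRange_one_eq_nil (show (0:Int) ≤ 1 by norm_num)]
  · simp only [solution, solution_alt]
    have hlen0 : (((PySem.List.pyRange 0 (number + 1) 1).map (fun _ => (1 : Int))).toArray).size
        = (number + 1).toNat := by
      simp [PySem.List.length_pyRange_one]
    have hL : ((((PySem.List.pyRange 2 (number + 1) 1).foldl sieveInner
        ((PySem.List.pyRange 0 (number + 1) 1).map (fun _ => (1 : Int))).toArray).size : Nat) : Int)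
        = number + 1 := by
      rw [size_foldl_sieveInner, hlen0]; omega
    rw [hL]
    refine PySem.List.foldl_congr_mem _ _ _ _ ?_
    intro acc i hi
    rw [PySem.List.mem_pyRange_one] at hi
    have hkeyA : pyAGet ((PySem.List.pyRange 2 (number + 1) 1).foldl sieveInner
        ((PySem.List.pyRange 0 (number + 1) 1).map (fun _ => (1 : Int))).toArray) i
        = ((Nat.divisors i.toNat).card : Int) := by
      rw [pyAGet, if_pos (by omega : (0:Int) ≤ i),
          sieve_getD number (by omega) i.toNat (by omega) (by omega)]
    have hinit : ((PySem.List.pyRepeat [(0 : Int)] (number + 1)).toArray).size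
        = (number + 1).toNat := by
      simp [PySem.List.pyRepeat_singleton, List.size_toArray]
    have hkeyB : pyBGet (pairLoop number 1 ((PySem.List.pyRepeat [(0 : Int)] (number + 1)).toArray)) i
        = ((Nat.divisors i.toNat).card : Int) := by
      have hN : number = ((number.toNat : Nat) : Int) := by omega
      have hzero : ((PySem.List.pyRepeat [(0 : Int)] (number + 1)).toArray).getD i.toNat 0 = 0 := by
        rw [Array.getD_eq_getD_getElem?, PySem.List.pyRepeat_singleton, List.getElem?_toArray,
            List.getElem?_eq_getElem (by simp [List.length_replicate]; omega)]
        simp [List.getElem_replicate]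
      have hloop := pairLoop_getD number.toNat (Nat.sqrt number.toNat) 1
        ((PySem.List.pyRepeat [(0 : Int)] (number + 1)).toArray) le_rfl (by omega)
        (by rw [hinit]; omega) i.toNat (by omega)
      rw [hzero, pairSum_eq_sqrtSum number.toNat i.toNat (by omega) (by omega),
          sqrtSum_one i.toNat (by omega)] at hloop
      rw [← hN] at hloop
      rw [pyBGet, if_pos (by omega : (0:Int) ≤ i)]
      simpa using hloop
    rw [hkeyA, hkeyB]
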